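-- pv_equiv track=rewrite | github.com/chboishabba/SensibLaw | src/policy/legal_follow_graph.py | _infer_detail_instrument_kind
-- ===== SOURCE A (Python) =====
-- from typing import Any, Mapping, Sequence
--
-- def _infer_detail_instrument_kind(detail: Mapping[str, Any], canonical_ref: str) -> str | None:
--     raw = " ".join(
--         str(value or "").strip()
--         for value in (
--             detail.get("ref_kind"),
--             detail.get("source_title"),
--             detail.get("canonical_ref"),
--             canonical_ref,
--         )
--         if str(value or "").strip()
--     ).casefold()
--     if not raw:
--         return None
--     for token, label in (
--         (" act ", "act"),
--         (" regulation ", "regulation"),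
--         (" rules ", "rule"),
--         (" rule ", "rule"),
--         (" ordinance ", "ordinance"),
--         (" order ", "order"),
--         (" treaty ", "treaty"),
--         (" protocol ", "protocol"),
--         (" convention ", "convention"),
--         (" charter ", "charter"),
--         (" instrument ", "instrument"),
--     ):
--         if token in f" {raw} ":
--             return label
--     return None
-- ===== SOURCE B (Python) =====
-- _KIND_BY_WORD = {
--     "act": (0, "act"),
--     "regulation": (1, "regulation"),
--     "rules": (2, "rule"),
--     "rule": (3, "rule"),
--     "ordinance": (4, "ordinance"),
--     "order": (5, "order"),
--     "treaty": (6, "treaty"),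
--     "protocol": (7, "protocol"),
--     "convention": (8, "convention"),
--     "charter": (9, "charter"),
--     "instrument": (10, "instrument"),
-- }
--
--
-- def _infer_detail_instrument_kind(detail, canonical_ref):
--     raw = " ".join(
--         str(value or "").strip()
--         for value in (
--             detail.get("ref_kind"),
--             detail.get("source_title"),
--             detail.get("canonical_ref"),
--             canonical_ref,
--         )
--         if str(value or "").strip()
--     ).casefold()
--     best = None
--     for word in raw.split(" "):
--         hit = _KIND_BY_WORD.get(word)
--         if hit is not None and (best is None or hit[0] < best[0]):
--             best = hit
--     return None if best is None else best[1]
-- ===== Notes on version B (the rewrite author's own statement) =====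
-- stated objective: alternative
-- what changed: A scans a fixed priority list of 11 padded tokens and substring-tests each against the joined text with early return; B splits the text into words once and keeps the dictionary hit with the smallest priority rank in a single running-minimum pass over the words.
import Mathlib
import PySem

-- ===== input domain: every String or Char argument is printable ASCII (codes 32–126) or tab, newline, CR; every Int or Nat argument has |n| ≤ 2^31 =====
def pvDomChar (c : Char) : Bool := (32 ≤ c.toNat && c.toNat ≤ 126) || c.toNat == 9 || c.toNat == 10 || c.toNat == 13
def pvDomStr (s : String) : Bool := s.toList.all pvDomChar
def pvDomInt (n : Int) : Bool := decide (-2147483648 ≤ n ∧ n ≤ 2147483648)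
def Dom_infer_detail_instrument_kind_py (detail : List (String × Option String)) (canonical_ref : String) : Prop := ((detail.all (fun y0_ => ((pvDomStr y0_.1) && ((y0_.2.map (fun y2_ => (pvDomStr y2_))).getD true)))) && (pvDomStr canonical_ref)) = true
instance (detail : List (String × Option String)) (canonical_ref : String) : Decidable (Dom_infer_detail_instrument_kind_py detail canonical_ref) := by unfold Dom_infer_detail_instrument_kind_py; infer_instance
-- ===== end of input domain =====

-- B replaces A's early-return scan of 11 padded-substring tests over the joined text by splitting the
-- text into words once and keeping the lowest-priority-rank dictionary hit (objective: alternative).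
-- Both ports transliterate `.casefold()` as `lower`, exact on the ASCII input domain.

-- ===== PORT A =====
-- shared text assembly, identical line for line in A and in B:
-- " ".join(str(value or "").strip() for value in (ref_kind, source_title, canonical_ref field, canonical_ref) if str(value or "").strip()).casefold()
def pvRawText (detail : List (String × Option String)) (canonical_ref : String) : String :=
  let cands : List (Option String) :=
    [((PySem.Dict.mk detail).get? "ref_kind").getD none,
     ((PySem.Dict.mk detail).get? "source_title").getD none,
     ((PySem.Dict.mk detail).get? "canonical_ref").getD none,
     some canonical_ref]
  -- str(value or "") on an optional string is just the string, or "" for None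
  let parts := (cands.map (fun v => PySem.Str.strip (v.getD ""))).filter (fun s => !s.toList.isEmpty)
  PySem.Str.lower (PySem.Str.join " " parts)

def pvTokens : List (String × String) :=
  [(" act ", "act"), (" regulation ", "regulation"), (" rules ", "rule"), (" rule ", "rule"),
   (" ordinance ", "ordinance"), (" order ", "order"), (" treaty ", "treaty"),
   (" protocol ", "protocol"), (" convention ", "convention"), (" charter ", "charter"),
   (" instrument ", "instrument")]

-- the for-loop with early return
def pvFindTok : List (String × String) → String → Option String
  | [], _ => none
  | (tok, label) :: rest, padded =>
      if PySem.Str.isIn tok padded then some label else pvFindTok rest padded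

def infer_detail_instrument_kind_py (detail : List (String × Option String)) (canonical_ref : String) : Option String :=
  let raw := pvRawText detail canonical_ref
  if raw.toList.isEmpty then none
  else pvFindTok pvTokens (String.ofList (' ' :: (raw.toList ++ [' '])))  -- f" {raw} "

-- ===== PORT B =====
def pvKindByWord : PySem.Dict String (Nat × String) :=
  ⟨[("act", (0, "act")), ("regulation", (1, "regulation")), ("rules", (2, "rule")),
    ("rule", (3, "rule")), ("ordinance", (4, "ordinance")), ("order", (5, "order")),
    ("treaty", (6, "treaty")), ("protocol", (7, "protocol")), ("convention", (8, "convention")),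
    ("charter", (9, "charter")), ("instrument", (10, "instrument"))]⟩

-- loop body: keep the hit with the smallest rank
def pvStep (best : Option (Nat × String)) (word : String) : Option (Nat × String) :=
  match pvKindByWord.get? word with
  | none => best
  | some hit =>
      match best with
      | none => some hit
      | some b => if hit.1 < b.1 then some hit else some b

def infer_detail_instrument_kind_py_alt (detail : List (String × Option String)) (canonical_ref : String) : Option String :=
  let raw := pvRawText detail canonical_ref
  let best := ((PySem.Str.split? raw " ").getD []).foldl pvStep none  -- raw.split(" "); " " ≠ "" so split? never fails
  match best with
  | none => none
  | some b => some b.2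

-- ===== PRECONDITION & SPEC =====
def Spec_infer_detail_instrument_kind_py (detail : List (String × Option String)) (canonical_ref : String) (out : Option String) : Prop := out = infer_detail_instrument_kind_py_alt detail canonical_ref
instance (detail : List (String × Option String)) (canonical_ref : String) (out : Option String) : Decidable (Spec_infer_detail_instrument_kind_py detail canonical_ref out) := by unfold Spec_infer_detail_instrument_kind_py; infer_instance

-- ===== CLAIM (what is proved, stated in full; the proofs are below) =====
def Claim_equal_infer_detail_instrument_kind_py : Prop := ∀ (detail : List (String × Option String)) (canonical_ref : String), Dom_infer_detail_instrument_kind_py detail canonical_ref → Spec_infer_detail_instrument_kind_py detail canonical_ref (infer_detail_instrument_kind_py detail canonical_ref)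

-- ===== LEMMAS AND PROOFS =====

-- proof-side characterisation of Python's  r.split(" ")  on lists of characters
def pvConsHead (pre : List Char) : List (List Char) → List (List Char)
  | [] => [pre]
  | p :: ps => (pre ++ p) :: ps

def pvSplitSp : List Char → List (List Char)
  | [] => [[]]
  | c :: rest => if c = ' ' then [] :: pvSplitSp rest else pvConsHead [c] (pvSplitSp rest)

def pvJoinSp : List (List Char) → List Char
  | [] => []
  | [p] => p
  | p :: q :: ps => p ++ ' ' :: pvJoinSp (q :: ps)

-- B-side spec: first table entry whose key occurs among the words
def pvFirstHit : List (String × (Nat × String)) → List String → Option (Nat × String)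
  | [], _ => none
  | (k, e) :: rest, ws => if k ∈ ws then some e else pvFirstHit rest ws

def pvChoose (a b : Option (Nat × String)) : Option (Nat × String) :=
  match b with
  | none => a
  | some e =>
      match a with
      | none => some e
      | some x => if e.1 < x.1 then some e else some x

theorem pvSplitSp_ne_nil (r : List Char) : pvSplitSp r ≠ [] := by
  induction r with
  | nil => simp [pvSplitSp]
  | cons c rest ih =>
    simp only [pvSplitSp]
    split
    · simp
    · rcases h : pvSplitSp rest with _ | ⟨p, ps⟩
      · exact absurd h ih
      · simp [pvConsHead]

theorem pvSplitSp_no_space (r : List Char) : ∀ p ∈ pvSplitSp r, ' ' ∉ p := by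
  induction r with
  | nil => intro p hp; simp [pvSplitSp] at hp; simp [hp]
  | cons c rest ih =>
    intro p hp
    simp only [pvSplitSp] at hp
    split at hp
    · rcases List.mem_cons.mp hp with rfl | h
      · simp
      · exact ih p h
    · rename_i hc
      rcases h : pvSplitSp rest with _ | ⟨q, qs⟩
      · exact absurd h (pvSplitSp_ne_nil rest)
      · rw [h] at hp
        rcases List.mem_cons.mp hp with rfl | hmem
        · intro hsp
          rcases List.mem_cons.mp hsp with h' | h'
          · exact hc h'.symm
          · exact ih q (by simp [h]) h'
        · exact ih p (by simp [h, hmem])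

theorem pvJoinSp_pvSplitSp (r : List Char) : pvJoinSp (pvSplitSp r) = r := by
  induction r with
  | nil => rfl
  | cons c rest ih =>
    simp only [pvSplitSp]
    split
    · rename_i hc
      subst hc
      rcases h : pvSplitSp rest with _ | ⟨q, qs⟩
      · exact absurd h (pvSplitSp_ne_nil rest)
      · rw [h] at ih; simp [pvJoinSp, ih]
    · rcases h : pvSplitSp rest with _ | ⟨q, qs⟩
      · exact absurd h (pvSplitSp_ne_nil rest)
      · rw [h] at ih
        rcases qs with _ | ⟨q', qs'⟩
        · simpa [pvConsHead, pvJoinSp] using congrArg (c :: ·) ih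
        · simpa [pvConsHead, pvJoinSp] using congrArg (c :: ·) ih

theorem pv_go_spec (r : List Char) : ∀ (fuel : Nat) (cur : List Char) (acc : List (List Char)),
    r.length < fuel →
    PySem.Chars.splitOn.go [' '] fuel r cur acc = acc.reverse ++ pvConsHead cur.reverse (pvSplitSp r) := by
  induction r with
  | nil =>
    intro fuel cur acc hf
    rcases fuel with _ | f
    · omega
    · show (cur.reverse :: acc).reverse = _
      simp [pvSplitSp, pvConsHead]
  | cons c rest ih =>
    intro fuel cur acc hf
    rcases fuel with _ | f
    · omega
    · have hstep : PySem.Chars.splitOn.go [' '] (f+1) (c::rest) cur acc =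
        if [' '].isPrefixOf (c::rest) then PySem.Chars.splitOn.go [' '] f rest [] (cur.reverse :: acc)
        else PySem.Chars.splitOn.go [' '] f rest (c :: cur) acc := rfl
      rw [hstep]
      have hf' : rest.length < f := by simpa using hf
      by_cases hc : c = ' '
      · subst hc
        simp only [List.isPrefixOf, BEq.rfl, Bool.true_and, if_pos]
        rw [ih f [] (cur.reverse :: acc) hf']
        rcases h : pvSplitSp rest with _ | ⟨q, qs⟩
        · exact absurd h (pvSplitSp_ne_nil rest)
        · simp [pvSplitSp, pvConsHead, h]
      · have hpre : [' '].isPrefixOf (c::rest) = false := by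
          simp [List.isPrefixOf]
          exact fun h => absurd h.symm hc
        rw [hpre]
        simp only [Bool.false_eq_true, if_false]
        rw [ih f (c :: cur) acc hf']
        rcases h : pvSplitSp rest with _ | ⟨q, qs⟩
        · exact absurd h (pvSplitSp_ne_nil rest)
        · simp [pvSplitSp, pvConsHead, h, hc]

theorem pvSplitOn_eq (r : List Char) : PySem.Chars.splitOn r [' '] = pvSplitSp r := by
  show PySem.Chars.splitOn.go [' '] (r.length + 1) r [] [] = _
  rw [pv_go_spec r (r.length + 1) [] [] (by omega)]
  rcases h : pvSplitSp r with _ | ⟨q, qs⟩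
  · exact absurd h (pvSplitSp_ne_nil r)
  · simp [pvConsHead]

-- a space-free block followed by ' ' determines itself
theorem pv_space_align : ∀ (t p u v : List Char), t ++ ' ' :: u = p ++ ' ' :: v → ' ' ∉ t → ' ' ∉ p → t = p := by
  intro t
  induction t with
  | nil =>
    intro p u v h _ hp
    rcases p with _ | ⟨d, p'⟩
    · rfl
    · simp at h
      exact absurd (h.1 ▸ List.mem_cons_self) hp
  | cons c t' ih =>
    intro p u v h ht hp
    rcases p with _ | ⟨d, p'⟩
    · simp at h
      exact absurd (h.1 ▸ List.mem_cons_self) ht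
    · simp at h
      obtain ⟨rfl, h2⟩ := h
      have := ih p' u v h2 (fun hm => ht (List.mem_cons_of_mem _ hm)) (fun hm => hp (List.mem_cons_of_mem _ hm))
      rw [this]

-- an occurrence that starts with ' ' lies beyond any space-free prefix
theorem pv_skip_prefix : ∀ (p s r : List Char), (' ' :: s) <:+: (p ++ r) → ' ' ∉ p → (' ' :: s) <:+: r := by
  intro p
  induction p with
  | nil => intro s r h _; simpa using h
  | cons d p' ih =>
    intro s r h hp
    rcases List.infix_cons_iff.mp h with hpre | hinf
    · obtain ⟨u, hu⟩ := hpre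
      simp at hu
      exact absurd (hu.1 ▸ List.mem_cons_self) hp
    · exact ih s r hinf (fun hm => hp (List.mem_cons_of_mem _ hm))

-- the padded-substring test is exactly word membership
theorem pv_tok_mem (ps : List (List Char)) (t : List Char) (hne : ps ≠ [])
    (hsp : ∀ p ∈ ps, ' ' ∉ p) (hts : ' ' ∉ t) :
    ((' ' :: (t ++ [' '])) <:+: (' ' :: (pvJoinSp ps ++ [' '])) ↔ t ∈ ps) := by
  induction ps with
  | nil => exact absurd rfl hne
  | cons p ps' ih =>
    have hpsp : ' ' ∉ p := hsp p List.mem_cons_self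
    rcases ps' with _ | ⟨q, ps''⟩
    · simp only [pvJoinSp]
      constructor
      · intro h
        rcases List.infix_cons_iff.mp h with hpre | hinf
        · obtain ⟨u, hu⟩ := hpre
          simp only [List.cons_append, List.cons.injEq, true_and] at hu
          have hu' : t ++ ' ' :: u = p ++ ' ' :: [] := by
            simpa [List.append_assoc] using hu
          have := pv_space_align t p u [] hu' hts hpsp
          simp [this]
        · have h2 := pv_skip_prefix p (t ++ [' ']) [' '] hinf hpsp
          have hlen := h2.length_le
          simp at hlen
      · intro h
        rcases List.mem_cons.mp h with rfl | h'
        · exact List.infix_refl _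
        · simp at h'
    · have hJ : pvJoinSp (p :: q :: ps'') = p ++ ' ' :: pvJoinSp (q :: ps'') := rfl
      have ihq := ih (by simp) (fun x hx => hsp x (List.mem_cons_of_mem _ hx))
      constructor
      · intro h
        rw [hJ] at h
        rcases List.infix_cons_iff.mp h with hpre | hinf
        · obtain ⟨u, hu⟩ := hpre
          simp only [List.cons_append, List.cons.injEq, true_and] at hu
          have hu' : t ++ ' ' :: u = p ++ ' ' :: (pvJoinSp (q :: ps'') ++ [' ']) := by
            simpa [List.append_assoc] using hu
          have := pv_space_align t p u _ hu' hts hpsp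
          simp [this]
        · have h2 : (' ' :: (t ++ [' '])) <:+: (' ' :: (pvJoinSp (q :: ps'') ++ [' '])) := by
            have := pv_skip_prefix p (t ++ [' ']) (' ' :: pvJoinSp (q :: ps'') ++ [' ']) (by simpa [List.append_assoc] using hinf) hpsp
            simpa using this
          exact List.mem_cons_of_mem _ (ihq.mp h2)
      · intro h
        rcases List.mem_cons.mp h with rfl | h'
        · rw [hJ]
          refine ⟨[], pvJoinSp (q :: ps'') ++ [' '], ?_⟩
          simp
        · have h2 := ihq.mpr h'
          have hsfx : (' ' :: (pvJoinSp (q :: ps'') ++ [' '])) <:+: (' ' :: (pvJoinSp (p :: q :: ps'') ++ [' '])) := by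
            rw [hJ]
            refine ⟨' ' :: p, [], ?_⟩
            simp
          exact h2.trans hsfx

theorem pv_mem_map_ofList (t : String) (ps : List (List Char)) :
    t ∈ ps.map String.ofList ↔ t.toList ∈ ps := by
  constructor
  · intro h
    obtain ⟨p, hp, rfl⟩ := List.mem_map.mp h
    simpa using hp
  · intro h
    have : String.ofList t.toList = t := by simp
    exact this ▸ List.mem_map_of_mem h

theorem pv_pad_isIn (r : List Char) (t tok : String) (h2 : ' ' ∉ t.toList)
    (htok : tok.toList = ' ' :: (t.toList ++ [' '])) :
    PySem.Str.isIn tok (String.ofList (' ' :: (r ++ [' ']))) =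
      decide (t ∈ (pvSplitSp r).map String.ofList) := by
  have hiff : PySem.Chars.isIn (' ' :: (t.toList ++ [' '])) (' ' :: (r ++ [' '])) = true ↔
      t.toList ∈ pvSplitSp r := by
    rw [PySem.Chars.isIn_iff_infix]
    have hm := pv_tok_mem (pvSplitSp r) t.toList (pvSplitSp_ne_nil r) (pvSplitSp_no_space r) h2
    rw [pvJoinSp_pvSplitSp r] at hm
    exact hm
  rw [PySem.Str.isIn_eq, htok, String.toList_ofList]
  cases hb : PySem.Chars.isIn (' ' :: (t.toList ++ [' '])) (' ' :: (r ++ [' ']))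
  · have hnot : ¬ t ∈ (pvSplitSp r).map String.ofList := fun hmem => by
      have hc := hiff.mpr ((pv_mem_map_ofList t _).mp hmem)
      rw [hb] at hc; cases hc
    simp [hnot]
  · simp [(pv_mem_map_ofList t _).mpr (hiff.mp hb)]

theorem pvStep_eq_choose (a : Option (Nat × String)) (w : String) :
    pvStep a w = pvChoose a (pvKindByWord.get? w) := by
  rcases h : pvKindByWord.get? w with _ | e <;> rcases a with _ | x <;> simp [pvStep, pvChoose, h]

theorem pvChoose_none_left (b : Option (Nat × String)) : pvChoose none b = b := by
  rcases b with _ | e <;> rfl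

theorem pvChoose_assoc (a b c : Option (Nat × String)) :
    pvChoose (pvChoose a b) c = pvChoose a (pvChoose b c) := by
  rcases a with _ | x <;> rcases b with _ | y <;> rcases c with _ | z <;>
    first
      | rfl
      | (simp only [pvChoose]; split_ifs <;> first | rfl | omega)
      | (by_cases h1 : y.1 < x.1 <;> by_cases h2 : z.1 < y.1 <;>
          simp only [pvChoose, h1, h2, if_true, if_false] <;> split_ifs <;> first | rfl | omega)

theorem pv_fold_merge (ws : List String) : ∀ (a : Option (Nat × String)),
    ws.foldl pvStep a = pvChoose a (ws.foldl pvStep none) := by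
  induction ws with
  | nil => intro a; rfl
  | cons w ws ih =>
    intro a
    show ws.foldl pvStep (pvStep a w) = pvChoose a (ws.foldl pvStep (pvStep none w))
    rw [ih (pvStep a w), ih (pvStep none w), pvStep_eq_choose, pvStep_eq_choose,
      pvChoose_none_left, pvChoose_assoc]

theorem pv_get?_cons (k : String) (e : Nat × String) (rest : List (String × (Nat × String))) (w : String) :
    (PySem.Dict.mk ((k, e) :: rest)).get? w = if k = w then some e else (PySem.Dict.mk rest).get? w := by
  by_cases h : k = w
  · simp [PySem.Dict.get?, List.find?, h]
  · have hb : (k == w) = false := by simp [h]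
    simp [PySem.Dict.get?, List.find?, hb, h]

theorem pv_firstHit_mem (tbl : List (String × (Nat × String))) (ws : List String)
    (x : Nat × String) (h : pvFirstHit tbl ws = some x) : ∃ k, (k, x) ∈ tbl := by
  induction tbl with
  | nil => simp [pvFirstHit] at h
  | cons p rest ih =>
    obtain ⟨k, e⟩ := p
    simp only [pvFirstHit] at h
    split at h
    · exact ⟨k, by simp [Option.some_inj.mp h]⟩
    · obtain ⟨k', hk'⟩ := ih h
      exact ⟨k', List.mem_cons_of_mem _ hk'⟩

theorem pv_get?_mem (tbl : List (String × (Nat × String))) (w : String) (x : Nat × String)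
    (h : (PySem.Dict.mk tbl).get? w = some x) : ∃ k, (k, x) ∈ tbl := by
  simp only [PySem.Dict.get?, Option.map_eq_some_iff] at h
  obtain ⟨p, hp, rfl⟩ := h
  exact ⟨p.1, by simpa using List.mem_of_find?_eq_some hp⟩

theorem pv_firstHit_cons (tbl : List (String × (Nat × String)))
    (hp : tbl.Pairwise (fun a b => a.2.1 < b.2.1)) (w : String) (ws : List String) :
    pvFirstHit tbl (w :: ws) = pvChoose ((PySem.Dict.mk tbl).get? w) (pvFirstHit tbl ws) := by
  induction tbl with
  | nil => rfl
  | cons p rest ih =>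
    obtain ⟨k, e⟩ := p
    rw [List.pairwise_cons] at hp
    obtain ⟨hlt, hrest⟩ := hp
    rw [pv_get?_cons]
    by_cases hkw : k = w
    · subst hkw
      rw [if_pos rfl]
      simp only [pvFirstHit, List.mem_cons_self, if_pos]
      rcases hF : (if k ∈ ws then some e else pvFirstHit rest ws) with _ | x
      · rfl
      · have hx : e.1 ≤ x.1 := by
          split at hF
          · simp_all
          · obtain ⟨k', hk'⟩ := pv_firstHit_mem rest ws x hF
            exact le_of_lt (hlt (k', x) hk')
        simp only [pvChoose]
        rw [if_neg (by omega)]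
    · have hcons : (k ∈ w :: ws) ↔ k ∈ ws := by
        simp [List.mem_cons, hkw]
      rw [if_neg hkw]
      by_cases hk : k ∈ ws
      · simp only [pvFirstHit, if_pos hk, if_pos (hcons.mpr hk)]
        rcases hG : (PySem.Dict.mk rest).get? w with _ | x
        · rfl
        · have hx : e.1 < x.1 := by
            obtain ⟨k', hk'⟩ := pv_get?_mem rest w x hG
            exact hlt (k', x) hk'
          simp only [pvChoose]
          rw [if_pos hx]
      · simp only [pvFirstHit, if_neg hk, if_neg (fun h => hk (hcons.mp h))]
        exact ih hrest

theorem pv_fold_eq_firstHit (ws : List String) :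
    ws.foldl pvStep none = pvFirstHit pvKindByWord.items ws := by
  induction ws with
  | nil => rfl
  | cons w ws ih =>
    rw [List.foldl_cons, pv_fold_merge, pvStep_eq_choose, pvChoose_none_left, ih,
      pv_firstHit_cons pvKindByWord.items (by decide) w ws]

theorem pv_firstHit_tbl (ws : List String) :
    pvFirstHit pvKindByWord.items ws =
      (if "act" ∈ ws then some (0, "act")
       else if "regulation" ∈ ws then some (1, "regulation")
       else if "rules" ∈ ws then some (2, "rule")
       else if "rule" ∈ ws then some (3, "rule")
       else if "ordinance" ∈ ws then some (4, "ordinance")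
       else if "order" ∈ ws then some (5, "order")
       else if "treaty" ∈ ws then some (6, "treaty")
       else if "protocol" ∈ ws then some (7, "protocol")
       else if "convention" ∈ ws then some (8, "convention")
       else if "charter" ∈ ws then some (9, "charter")
       else if "instrument" ∈ ws then some (10, "instrument")
       else none : Option (Nat × String)) := rfl

set_option maxHeartbeats 4000000 in
theorem pv_core (raw : String) :
    (if raw.toList.isEmpty then none
     else pvFindTok pvTokens (String.ofList (' ' :: (raw.toList ++ [' ']))))
    = (match ((PySem.Str.split? raw " ").getD []).foldl pvStep none with
       | none => none
       | some b => some b.2) := by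
  by_cases hr : raw.toList.isEmpty
  · have hraw : raw = "" := by
      rw [← String.toList_inj]
      simpa using hr
    subst hraw
    decide
  · rw [if_neg (by simpa using hr)]
    have hws : (PySem.Str.split? raw " ").getD [] = (pvSplitSp raw.toList).map String.ofList := by
      have : PySem.Str.split? raw " " = some ((PySem.Chars.splitOn raw.toList [' ']).map String.ofList) := by
        simp [PySem.Str.split?, PySem.Chars.split?]
      rw [this, pvSplitOn_eq]
      rfl
    rw [hws, pv_fold_eq_firstHit]
    simp only [pvTokens, pvFindTok]
    rw [pv_pad_isIn raw.toList "act" " act " (by decide) (by decide),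
        pv_pad_isIn raw.toList "regulation" " regulation " (by decide) (by decide),
        pv_pad_isIn raw.toList "rules" " rules " (by decide) (by decide),
        pv_pad_isIn raw.toList "rule" " rule " (by decide) (by decide),
        pv_pad_isIn raw.toList "ordinance" " ordinance " (by decide) (by decide),
        pv_pad_isIn raw.toList "order" " order " (by decide) (by decide),
        pv_pad_isIn raw.toList "treaty" " treaty " (by decide) (by decide),
        pv_pad_isIn raw.toList "protocol" " protocol " (by decide) (by decide),
        pv_pad_isIn raw.toList "convention" " convention " (by decide) (by decide),
        pv_pad_isIn raw.toList "charter" " charter " (by decide) (by decide),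
        pv_pad_isIn raw.toList "instrument" " instrument " (by decide) (by decide)]
    rw [pv_firstHit_tbl]
    simp only [decide_eq_true_eq]
    by_cases h1 : "act" ∈ List.map String.ofList (pvSplitSp raw.toList)
    · rw [if_pos h1, if_pos h1]
    rw [if_neg h1, if_neg h1]
    by_cases h2 : "regulation" ∈ List.map String.ofList (pvSplitSp raw.toList)
    · rw [if_pos h2, if_pos h2]
    rw [if_neg h2, if_neg h2]
    by_cases h3 : "rules" ∈ List.map String.ofList (pvSplitSp raw.toList)
    · rw [if_pos h3, if_pos h3]
    rw [if_neg h3, if_neg h3]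
    by_cases h4 : "rule" ∈ List.map String.ofList (pvSplitSp raw.toList)
    · rw [if_pos h4, if_pos h4]
    rw [if_neg h4, if_neg h4]
    by_cases h5 : "ordinance" ∈ List.map String.ofList (pvSplitSp raw.toList)
    · rw [if_pos h5, if_pos h5]
    rw [if_neg h5, if_neg h5]
    by_cases h6 : "order" ∈ List.map String.ofList (pvSplitSp raw.toList)
    · rw [if_pos h6, if_pos h6]
    rw [if_neg h6, if_neg h6]
    by_cases h7 : "treaty" ∈ List.map String.ofList (pvSplitSp raw.toList)
    · rw [if_pos h7, if_pos h7]
    rw [if_neg h7, if_neg h7]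
    by_cases h8 : "protocol" ∈ List.map String.ofList (pvSplitSp raw.toList)
    · rw [if_pos h8, if_pos h8]
    rw [if_neg h8, if_neg h8]
    by_cases h9 : "convention" ∈ List.map String.ofList (pvSplitSp raw.toList)
    · rw [if_pos h9, if_pos h9]
    rw [if_neg h9, if_neg h9]
    by_cases h10 : "charter" ∈ List.map String.ofList (pvSplitSp raw.toList)
    · rw [if_pos h10, if_pos h10]
    rw [if_neg h10, if_neg h10]
    by_cases h11 : "instrument" ∈ List.map String.ofList (pvSplitSp raw.toList)
    · rw [if_pos h11, if_pos h11]
    rw [if_neg h11, if_neg h11]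

-- ===== VERDICT (by name: the statement is the Claim_ definition above) =====
theorem infer_detail_instrument_kind_py_spec : Claim_equal_infer_detail_instrument_kind_py := by
  intro detail canonical_ref _
  unfold Spec_infer_detail_instrument_kind_py infer_detail_instrument_kind_py infer_detail_instrument_kind_py_alt
  exact pv_core (pvRawText detail canonical_ref)
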